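-- pv_equiv track=rewrite | github.com/muhdshahan/Daily-DSA | 3912-valid-elements-in-an-array/3912-valid-elements-in-an-array.py | findValidElements
-- ===== SOURCE A (Python) =====
-- def findValidElements(nums: list[int]) -> list[int]:
--     if len(nums)<3:
--         return nums
--     rslt = [nums[0]]
--     for i in range(1,len(nums)-1):
--         left_max = max(nums[:i])
--         right_max = max(nums[i+1:])
--         if left_max and nums[i]>left_max:
--             rslt.append(nums[i])
--         elif right_max and nums[i]>right_max:
--             rslt.append(nums[i])
--     rslt.append(nums[-1])
--     return rslt
-- ===== SOURCE B (Python) =====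
-- def findValidElements(nums: list[int]) -> list[int]:
--     n = len(nums)
--     if n < 3:
--         return nums
--     pre = [nums[0]]                     # pre[j] = max(nums[:j+1]) for j in 0..n-3
--     for x in nums[1:n-2]:
--         pre.append(max(pre[-1], x))
--     suf = [nums[n-1]]
--     for x in reversed(nums[2:n-1]):
--         suf.append(max(suf[-1], x))
--     suf.reverse()                       # suf[j] = max(nums[j+2:]) for j in 0..n-3
--     mid = [nums[i] for i in range(1, n - 1)
--            if nums[i] > pre[i - 1] or nums[i] > suf[i - 1]]
--     return [nums[0]] + mid + [nums[-1]]
-- ===== Notes on version B (the rewrite author's own statement) =====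
-- stated objective: faster
-- what changed: B precomputes prefix-max and suffix-max arrays and builds the result in one linear scan instead of recomputing max(nums[:i]) and max(nums[i+1:]) inside the loop; B also drops A's truthiness test so a side maximum equal to 0 is compared like any other value.
-- intended difference: On lists of length >= 3 with a positive middle element whose maximum on one side is exactly 0 (so A's 'if left_max and ...' truthiness test skips the comparison) and which does not beat the other side's nonzero maximum, A omits that element while B includes it, which is the intended 'greater than the maximum on one side' behaviour. — e.g. on findValidElements([0, 1, 2]): A returns [0, 2], B returns [0, 1, 2]
import Mathlib
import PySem

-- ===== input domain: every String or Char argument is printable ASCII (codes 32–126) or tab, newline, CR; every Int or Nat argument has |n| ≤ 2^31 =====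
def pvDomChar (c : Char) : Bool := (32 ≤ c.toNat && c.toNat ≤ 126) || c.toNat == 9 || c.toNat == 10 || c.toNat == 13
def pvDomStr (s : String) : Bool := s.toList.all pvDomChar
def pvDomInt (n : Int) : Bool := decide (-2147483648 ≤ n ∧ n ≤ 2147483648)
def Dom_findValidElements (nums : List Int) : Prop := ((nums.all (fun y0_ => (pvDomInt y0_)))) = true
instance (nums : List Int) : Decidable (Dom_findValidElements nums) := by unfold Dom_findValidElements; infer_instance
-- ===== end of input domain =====

-- B replaces A's per-index max(nums[:i]) / max(nums[i+1:]) rescans by prefix-max and suffix-max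
-- arrays and one scan; on middle elements whose one-sided max is 0, A's truthiness test skips
-- them and B keeps them (see D_ below).

-- ===== PORT A =====
def findValidElements (nums : List Int) : List Int :=
  if nums.length < 3 then nums
  else
    let n : Int := nums.length
    let rslt : List Int := [PySem.List.pyGetD nums 0 0]
    let rslt := (PySem.List.pyRange 1 (n - 1) 1).foldl (fun acc i =>
      -- Python max raises only on an empty list; for 1 ≤ i ≤ n-2 both slices are
      -- nonempty, so the .getD 0 default is unreachable and the port is exact.
      let left_max := (PySem.List.max? (PySem.List.slice nums none (some i)) (fun y => y)).getD 0
      let right_max := (PySem.List.max? (PySem.List.slice nums (some (i + 1)) none) (fun y => y)).getD 0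
      if left_max ≠ 0 ∧ PySem.List.pyGetD nums i 0 > left_max then acc ++ [PySem.List.pyGetD nums i 0]
      else if right_max ≠ 0 ∧ PySem.List.pyGetD nums i 0 > right_max then acc ++ [PySem.List.pyGetD nums i 0]
      else acc) rslt
    rslt ++ [PySem.List.pyGetD nums (-1) 0]

-- ===== PORT B =====
-- running-max accumulation loop of Source B ('acc.append(max(acc[-1], x))')
def pvScanMax (m : Int) : List Int → List Int
  | [] => [m]
  | x :: xs => m :: pvScanMax (max m x) xs

def findValidElements_alt (nums : List Int) : List Int :=
  if nums.length < 3 then nums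
  else
    let n : Int := nums.length
    let pre := pvScanMax (PySem.List.pyGetD nums 0 0) (PySem.List.slice nums (some 1) (some (n - 2)))
    let suf := (pvScanMax (PySem.List.pyGetD nums (n - 1) 0)
                  (PySem.List.slice nums (some 2) (some (n - 1))).reverse).reverse
    let mid := ((PySem.List.pyRange 1 (n - 1) 1).filter (fun i =>
        decide (PySem.List.pyGetD nums i 0 > PySem.List.pyGetD pre (i - 1) 0 ∨
                PySem.List.pyGetD nums i 0 > PySem.List.pyGetD suf (i - 1) 0))).map
        (fun i => PySem.List.pyGetD nums i 0)
    [PySem.List.pyGetD nums 0 0] ++ mid ++ [PySem.List.pyGetD nums (-1) 0]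

-- ===== PRECONDITION & SPEC =====
-- On lists with a positive middle element whose maximum on one side is exactly 0 (A's
-- 'if left_max and …' truthiness test skips that comparison) and which does not beat the
-- other side's nonzero maximum, A omits that element while B includes it, which is the
-- intended 'greater than the maximum on one side' behaviour.
def D_findValidElements (nums : List Int) : Prop :=
  ∃ k < nums.length, 1 ≤ k ∧ k + 2 ≤ nums.length ∧
    0 < nums.getD k 0 ∧
    (((nums.take k).max?.getD 0 = 0 ∧
        ((nums.drop (k+1)).max?.getD 0 = 0 ∨ nums.getD k 0 ≤ (nums.drop (k+1)).max?.getD 0)) ∨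
     ((nums.drop (k+1)).max?.getD 0 = 0 ∧ nums.getD k 0 ≤ (nums.take k).max?.getD 0))
instance (nums : List Int) : Decidable (D_findValidElements nums) := by
  unfold D_findValidElements; infer_instance
def Spec_findValidElements (nums : List Int) (out : List Int) : Prop :=
  ¬ D_findValidElements nums → out = findValidElements_alt nums
instance (nums : List Int) (out : List Int) : Decidable (Spec_findValidElements nums out) := by
  unfold Spec_findValidElements; infer_instance
def pvDiffWitness_findValidElements : List Int := [0, 1, 2]
def pvDiffWitnessOut_findValidElements : (List Int) × (List Int) := ([0, 2], [0, 1, 2])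

-- ===== CLAIM (what is proved, stated in full; the proofs are below) =====
def Claim_unchanged_findValidElements : Prop := ∀ (nums : List Int), Dom_findValidElements nums → Spec_findValidElements nums (findValidElements nums)
def Claim_changed_findValidElements : Prop := Dom_findValidElements (pvDiffWitness_findValidElements) ∧ D_findValidElements (pvDiffWitness_findValidElements) ∧ findValidElements (pvDiffWitness_findValidElements) = pvDiffWitnessOut_findValidElements.1 ∧ findValidElements_alt (pvDiffWitness_findValidElements) = pvDiffWitnessOut_findValidElements.2 ∧ pvDiffWitnessOut_findValidElements.1 ≠ pvDiffWitnessOut_findValidElements.2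
def Claim_exact_findValidElements : Prop := ∀ (nums : List Int), Dom_findValidElements nums → D_findValidElements nums → findValidElements nums ≠ findValidElements_alt nums


-- ===== LEMMAS AND PROOFS =====

-- max(l) for nonempty l, as a total value (max?.getD 0)
def pvM (l : List Int) : Int := l.max?.getD 0

theorem pvM_cons (a : Int) (t : List Int) : pvM (a :: t) = t.foldl max a := by
  unfold pvM; rw [List.max?_cons']; rfl

theorem pvMax_id_eq_pvM (l : List Int) (h : l ≠ []) :
    (PySem.List.max? l (fun y => y)).getD 0 = pvM l := by
  cases l with
  | nil => exact absurd rfl h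
  | cons a t => rw [PySem.List.max?_id_cons, pvM_cons]; rfl

theorem pvFoldlMax_reverse (l : List Int) (a : Int) : l.reverse.foldl max a = l.foldl max a := by
  induction l generalizing a with
  | nil => rfl
  | cons x l ih =>
    simp only [List.reverse_cons, List.foldl_append, List.foldl_cons, List.foldl_nil, ih]
    rw [max_comm a x, List.foldl_assoc, max_comm]

theorem pvM_append_singleton (u : List Int) (m : Int) : pvM (u ++ [m]) = u.foldl max m := by
  cases u with
  | nil => simp [pvM, List.max?]
  | cons a u' =>
    rw [List.cons_append, pvM_cons, List.foldl_append, List.foldl_cons, List.foldl_nil,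
      List.foldl_cons, List.foldl_assoc, max_comm]

theorem pvScanMax_length (h : Int) (xs : List Int) : (pvScanMax h xs).length = xs.length + 1 := by
  induction xs generalizing h with
  | nil => rfl
  | cons x xs ih => simp [pvScanMax, ih]

theorem pvScanMax_getD (xs : List Int) (h : Int) (j : Nat) (hj : j ≤ xs.length) :
    (pvScanMax h xs).getD j 0 = (xs.take j).foldl max h := by
  induction xs generalizing h j with
  | nil =>
    have : j = 0 := by simpa using hj
    subst this; rfl
  | cons x xs ih =>
    cases j with
    | zero => rfl
    | succ j =>
      simp only [pvScanMax, List.getD_cons_succ, List.take_succ_cons, List.foldl_cons]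
      exact ih (max h x) j (by simpa using hj)

theorem pvScanMaxRev_getD (ys : List Int) (m : Int) (j : Nat) (hj : j ≤ ys.length) :
    ((pvScanMax m ys.reverse).reverse).getD j 0 = (ys.drop j).foldl max m := by
  have hlen : (pvScanMax m ys.reverse).length = ys.length + 1 := by
    rw [pvScanMax_length, List.length_reverse]
  have h2 := pvScanMax_getD ys.reverse m (ys.length - j) (by simp)
  rw [List.getD_eq_getElem _ _ (by simp [hlen]; omega), List.getElem_reverse]
  simp only [hlen, Nat.add_sub_cancel]
  rw [← List.getD_eq_getElem _ 0 (by omega), h2, List.take_reverse,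
    show ys.length - (ys.length - j) = j from by omega, pvFoldlMax_reverse]

-- two nested 'if: append' branches with the same appended element collapse to a filter
theorem pvFoldl_ite2 (l acc : List Int) (p q : Int → Prop) [DecidablePred p] [DecidablePred q]
    (f : Int → Int) :
    l.foldl (fun acc x => if p x then acc ++ [f x] else if q x then acc ++ [f x] else acc) acc
      = acc ++ (l.filter (fun x => decide (p x ∨ q x))).map f := by
  have h : (fun (acc : List Int) (x : Int) =>
        if p x then acc ++ [f x] else if q x then acc ++ [f x] else acc)
      = fun acc x => if p x ∨ q x then acc ++ [f x] else acc := by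
    funext acc x
    by_cases hp : p x <;> by_cases hq : q x <;> simp [hp, hq]
  rw [h, PySem.List.foldl_append_ite]

-- strict monotonicity of filter length under a pointwise-stronger predicate
theorem pvFilter_length_le (l : List Int) (p q : Int → Bool)
    (himp : ∀ x ∈ l, p x = true → q x = true) :
    (l.filter p).length ≤ (l.filter q).length := by
  induction l with
  | nil => simp
  | cons y l ih =>
    have ih' := ih (fun x hx h => himp x (List.mem_cons_of_mem _ hx) h)
    by_cases hpy : p y = true
    · have hqy := himp y List.mem_cons_self hpy
      simp [hpy, hqy]; omega
    · by_cases hqy : q y = true <;> simp [hpy, hqy] <;> omega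

theorem pvFilter_length_lt (l : List Int) (p q : Int → Bool)
    (himp : ∀ x ∈ l, p x = true → q x = true) (x : Int) (hx : x ∈ l)
    (hq : q x = true) (hp : p x = false) :
    (l.filter p).length < (l.filter q).length := by
  induction l with
  | nil => cases hx
  | cons y l ih =>
    have himp' : ∀ z ∈ l, p z = true → q z = true :=
      fun z hz h => himp z (List.mem_cons_of_mem _ hz) h
    rcases List.mem_cons.mp hx with rfl | hx'
    · simp [hp, hq]
      exact pvFilter_length_le l p q himp'
    · have hlt := ih himp' hx'
      by_cases hpy : p y = true
      · have hqy := himp y List.mem_cons_self hpy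
        simp [hpy, hqy]; omega
      · by_cases hqy : q y = true <;> simp [hpy, hqy] <;> omega


theorem pv_take_cons (a : Int) (t : List Int) (k : Nat) (hk1 : 1 ≤ k) :
    (a :: t).take k = a :: t.take (k - 1) := by
  obtain ⟨k', rfl⟩ : ∃ k', k = k' + 1 := ⟨k - 1, by omega⟩
  simp

theorem pvLeftA (a : Int) (t : List Int) (k : Nat) (hk1 : 1 ≤ k) :
    (PySem.List.max? (PySem.List.slice (a :: t) none (some (k : Int))) (fun y => y)).getD 0
      = (t.take (k - 1)).foldl max a := by
  rw [PySem.List.slice_to_natCast, pv_take_cons a t k hk1, PySem.List.max?_id_cons]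
  rfl

theorem pvRightA (a : Int) (t : List Int) (k : Nat) (hk2 : k + 2 ≤ t.length + 1) :
    (PySem.List.max? (PySem.List.slice (a :: t) (some ((k : Int) + 1)) none) (fun y => y)).getD 0
      = pvM (t.drop k) := by
  rw [show ((k : Int) + 1) = ((k + 1 : Nat) : Int) from by push_cast; ring,
    PySem.List.slice_from_natCast, List.drop_succ_cons]
  exact pvMax_id_eq_pvM _ (by simp [List.drop_eq_nil_iff]; omega)

theorem pvLeftB (a : Int) (t : List Int) (k : Nat) (hk1 : 1 ≤ k) (hk2 : k + 2 ≤ t.length + 1) :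
    PySem.List.pyGetD (pvScanMax (PySem.List.pyGetD (a :: t) 0 0)
        (PySem.List.slice (a :: t) (some 1) (some (((a :: t).length : Int) - 2)))) ((k : Int) - 1) 0
      = (t.take (k - 1)).foldl max a := by
  have h0 : PySem.List.pyGetD (a :: t) 0 0 = a := by
    simp [PySem.List.pyGetD, PySem.List.pyGet?, PySem.List.pyIdx?]
  have hs : PySem.List.slice (a :: t) (some 1) (some (((a :: t).length : Int) - 2))
      = t.take (t.length - 1 - 1) := by
    rw [show ((1 : Int)) = ((1 : Nat) : Int) from rfl,
      show (((a :: t).length : Int) - 2) = ((t.length - 1 : Nat) : Int) from by simp; omega,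
      PySem.List.slice_natCast]
    rfl
  rw [h0, hs, show ((k : Int) - 1) = ((k - 1 : Nat) : Int) from by omega,
    PySem.List.pyGetD_natCast,
    pvScanMax_getD _ _ _ (by simp; omega),
    List.take_take, show min (k - 1) (t.length - 1 - 1) = k - 1 from by omega]

theorem pvRightB (a : Int) (t : List Int) (k : Nat) (hk1 : 1 ≤ k) (hk2 : k + 2 ≤ t.length + 1) :
    PySem.List.pyGetD ((pvScanMax (PySem.List.pyGetD (a :: t) (((a :: t).length : Int) - 1) 0)
        ((PySem.List.slice (a :: t) (some 2) (some (((a :: t).length : Int) - 1))).reverse)).reverse)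
      ((k : Int) - 1) 0
      = pvM (t.drop k) := by
  have hm : PySem.List.pyGetD (a :: t) (((a :: t).length : Int) - 1) 0 = t.getD (t.length - 1) 0 := by
    rw [show (((a :: t).length : Int) - 1) = ((t.length : Nat) : Int) from by simp,
      PySem.List.pyGetD_natCast]
    conv_lhs => rw [show t.length = (t.length - 1) + 1 from by omega]
    rw [List.getD_cons_succ]
  have hys : PySem.List.slice (a :: t) (some 2) (some (((a :: t).length : Int) - 1))
      = (t.drop 1).take (t.length - 2) := by
    rw [show ((2 : Int)) = ((2 : Nat) : Int) from rfl,
      show (((a :: t).length : Int) - 1) = ((t.length : Nat) : Int) from by simp,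
      PySem.List.slice_natCast]
    rfl
  have hyslen : ((t.drop 1).take (t.length - 2)).length = t.length - 2 := by simp; omega
  rw [hm, hys, show ((k : Int) - 1) = ((k - 1 : Nat) : Int) from by omega,
    PySem.List.pyGetD_natCast,
    pvScanMaxRev_getD _ _ _ (by rw [hyslen]; omega)]
  -- t.drop k decomposes as the clipped suffix slice plus the last element of t
  have hu : t.drop k ≠ [] := by simp [List.drop_eq_nil_iff]; omega
  have hlast : t.getD (t.length - 1) 0 = (t.drop k).getLast hu := by
    rw [List.getLast_eq_getElem, List.getElem_drop,
      List.getD_eq_getElem _ _ (by omega)]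
    congr 1
    simp
    omega
  have hdecomp : ((t.drop 1).take (t.length - 2)).drop (k - 1) = (t.drop k).dropLast := by
    rw [List.drop_take, List.drop_drop, show 1 + (k - 1) = k from by omega,
      List.dropLast_eq_take]
    congr 1
    simp
    omega
  rw [hlast, hdecomp, ← pvM_append_singleton, List.dropLast_concat_getLast hu]

theorem pvDTake (a : Int) (t : List Int) (k : Nat) (hk1 : 1 ≤ k) :
    ((a :: t).take k).max?.getD 0 = (t.take (k - 1)).foldl max a := by
  rw [pv_take_cons a t k hk1, List.max?_cons']
  rfl

theorem pvDDrop (a : Int) (t : List Int) (k : Nat) :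
    ((a :: t).drop (k + 1)).max?.getD 0 = pvM (t.drop k) := by
  rw [List.drop_succ_cons]
  rfl


theorem pvNormA (a : Int) (t : List Int) (h3 : ¬ (a :: t).length < 3) :
    findValidElements (a :: t) =
      (PySem.List.pyRange 1 (((a :: t).length : Int) - 1) 1).foldl (fun acc i =>
        if (PySem.List.max? (PySem.List.slice (a :: t) none (some i)) (fun y => y)).getD 0 ≠ 0 ∧
            PySem.List.pyGetD (a :: t) i 0 >
              (PySem.List.max? (PySem.List.slice (a :: t) none (some i)) (fun y => y)).getD 0
        then acc ++ [PySem.List.pyGetD (a :: t) i 0]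
        else if (PySem.List.max? (PySem.List.slice (a :: t) (some (i + 1)) none) (fun y => y)).getD 0 ≠ 0 ∧
            PySem.List.pyGetD (a :: t) i 0 >
              (PySem.List.max? (PySem.List.slice (a :: t) (some (i + 1)) none) (fun y => y)).getD 0
        then acc ++ [PySem.List.pyGetD (a :: t) i 0]
        else acc) [PySem.List.pyGetD (a :: t) 0 0] ++ [PySem.List.pyGetD (a :: t) (-1) 0] := by
  rw [findValidElements, if_neg h3]

theorem pvNormB (a : Int) (t : List Int) (h3 : ¬ (a :: t).length < 3) :
    findValidElements_alt (a :: t) =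
      [PySem.List.pyGetD (a :: t) 0 0] ++
        ((PySem.List.pyRange 1 (((a :: t).length : Int) - 1) 1).filter (fun i =>
          decide (PySem.List.pyGetD (a :: t) i 0 >
              PySem.List.pyGetD (pvScanMax (PySem.List.pyGetD (a :: t) 0 0)
                (PySem.List.slice (a :: t) (some 1) (some (((a :: t).length : Int) - 2)))) (i - 1) 0 ∨
            PySem.List.pyGetD (a :: t) i 0 >
              PySem.List.pyGetD ((pvScanMax (PySem.List.pyGetD (a :: t) (((a :: t).length : Int) - 1) 0)
                ((PySem.List.slice (a :: t) (some 2) (some (((a :: t).length : Int) - 1))).reverse)).reverse)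
                (i - 1) 0))).map
          (fun i => PySem.List.pyGetD (a :: t) i 0) ++ [PySem.List.pyGetD (a :: t) (-1) 0] := by
  rw [findValidElements_alt, if_neg h3]

theorem pvMain (nums : List Int) (hD : ¬ D_findValidElements nums) :
    findValidElements nums = findValidElements_alt nums := by
  by_cases h3 : nums.length < 3
  · rw [findValidElements, findValidElements_alt, if_pos h3, if_pos h3]
  · obtain ⟨a, t, rfl⟩ : ∃ a t, nums = a :: t := by
      cases nums with
      | nil => simp at h3
      | cons a t => exact ⟨a, t, rfl⟩
    rw [pvNormA a t h3, pvFoldl_ite2, pvNormB a t h3]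
    congr 3
    apply List.filter_congr
    intro i hi
    rw [PySem.List.mem_pyRange_one] at hi
    simp only [List.length_cons] at hi h3 hD
    have hik : i = ((i.toNat : Nat) : Int) := by omega
    set k := i.toNat with hk
    have hk1 : 1 ≤ k := by omega
    have hk2 : k + 2 ≤ t.length + 1 := by omega
    rw [hik, pvLeftA a t k hk1, pvRightA a t k hk2,
      show ((k : Int) - 1) = ((k : Int) - 1) from rfl]
    rw [show (((a :: t).length : Int)) = (((a :: t).length : Int)) from rfl] at *
    rw [pvLeftB a t k hk1 hk2, pvRightB a t k hk1 hk2, decide_eq_decide]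
    have hDk : ¬ (0 < (a :: t).getD k 0 ∧
        ((((a :: t).take k).max?.getD 0 = 0 ∧
            (((a :: t).drop (k+1)).max?.getD 0 = 0 ∨
              (a :: t).getD k 0 ≤ ((a :: t).drop (k+1)).max?.getD 0)) ∨
          (((a :: t).drop (k+1)).max?.getD 0 = 0 ∧
            (a :: t).getD k 0 ≤ ((a :: t).take k).max?.getD 0))) := by
      intro hc
      exact hD ⟨k, by simp; omega, hk1, by simp; omega, hc.1, hc.2⟩
    rw [pvDTake a t k hk1, pvDDrop a t k,
      show (a :: t).getD k 0 = PySem.List.pyGetD (a :: t) ((k : Nat) : Int) 0 from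
        (PySem.List.pyGetD_natCast _ _ _).symm] at hDk
    omega


theorem pvNe (x0 xe : Int) (f : Int → Int) (l : List Int) (p q : Int → Bool)
    (himp : ∀ x ∈ l, p x = true → q x = true) (x : Int) (hx : x ∈ l)
    (hq : q x = true) (hp : p x = false) :
    ([x0] ++ (l.filter p).map f) ++ [xe] ≠ ([x0] ++ (l.filter q).map f) ++ [xe] := by
  intro h
  have hl := congrArg List.length h
  simp only [List.length_append, List.length_map, List.length_cons, List.length_nil] at hl
  exact absurd (by omega : (l.filter p).length = (l.filter q).length)
    (Nat.ne_of_lt (pvFilter_length_lt l p q himp x hx hq hp))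

-- ===== VERDICT (by name: the statement is the Claim_ definition above) =====
theorem findValidElements_spec : Claim_unchanged_findValidElements := by
  intro nums _ hD
  exact pvMain nums hD

theorem findValidElements_changed : Claim_changed_findValidElements := by
  unfold Claim_changed_findValidElements; decide

theorem findValidElements_tight : Claim_exact_findValidElements := by
  intro nums _ hD
  obtain ⟨k, hklt, hk1, hkk, hx, hdisj⟩ := hD
  have h3 : ¬ nums.length < 3 := by omega
  obtain ⟨a, t, rfl⟩ : ∃ a t, nums = a :: t := by
    cases nums with
    | nil => simp at hklt
    | cons a t => exact ⟨a, t, rfl⟩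
  simp only [List.length_cons] at hklt hkk h3
  have hk2 : k + 2 ≤ t.length + 1 := hkk
  rw [pvDTake a t k hk1, pvDDrop a t k] at hdisj
  rw [show (a :: t).getD k 0 = PySem.List.pyGetD (a :: t) ((k : Nat) : Int) 0 from
    (PySem.List.pyGetD_natCast _ _ _).symm] at hx hdisj
  rw [pvNormA a t (by simpa using h3), pvFoldl_ite2, pvNormB a t (by simpa using h3)]
  refine pvNe _ _ _ _ _ _ ?_ ((k : Nat) : Int) ?_ ?_ ?_
  · intro i hi hpi
    rw [PySem.List.mem_pyRange_one] at hi
    simp only [List.length_cons] at hi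
    have hik : i = ((i.toNat : Nat) : Int) := by omega
    set k' := i.toNat with hk'
    have hk1' : 1 ≤ k' := by omega
    have hk2' : k' + 2 ≤ t.length + 1 := by omega
    rw [hik, pvLeftA a t k' hk1', pvRightA a t k' hk2'] at hpi
    rw [hik, pvLeftB a t k' hk1' hk2', pvRightB a t k' hk1' hk2']
    simp only [decide_eq_true_eq] at hpi ⊢
    omega
  · exact PySem.List.mem_pyRange_one.mpr ⟨by omega, by simp; omega⟩
  · rw [pvLeftB a t k hk1 hk2, pvRightB a t k hk1 hk2]
    simp only [decide_eq_true_eq]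
    omega
  · rw [pvLeftA a t k hk1, pvRightA a t k hk2]
    rw [decide_eq_false_iff_not]
    omega
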